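-- pv_equiv track=rewrite | github.com/George47/coding-prep | general.py | simplifyEquation
-- ===== SOURCE A (Python) =====
-- def simplifyEquation(s: str) -> str:
--     # cases to consider
--     # if current is - and next is (
--     # means need to flip sign
--     triggerCounter = 0
--     stack = []
--     result = ''
--     for i in range(len(s)):
--         # if -( then need to trigger
--         if s[i] == '-' and s[i+1] == '(':
--             triggerCounter += 1
--             stack.append('-(')
--             sign = s[i]
--             for j in range(triggerCounter - 1):
--                 sign = flipSign(sign)
--             result += sign
--             continue
--         # when encountering closing bracket
--         if s[i] == ')':
--             if stack.pop() == '-(':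
--                 triggerCounter -= 1
--         if s[i] in ['(', ')']:
--             continue
--         if s[i] in ['+', '-']:
--             sign = s[i]
--             for z in range(triggerCounter):
--                 sign = flipSign(sign)
--             result += sign
--             continue
--         result += s[i]
--     return result
--
-- def flipSign(sign: str) -> str:
--     signs = {
--         '+': '-',
--         '-': '+'
--     }
--     return signs[sign]
-- ===== SOURCE B (Python) =====
-- def simplifyEquation(s: str) -> str:
--     # One pass with an integer depth counter: the sign to emit depends only on
--     # the parity of the number of open "-(" groups, so no stack and no inner
--     # flipSign loop are needed.
--     t = 0
--     out = []
--     n = len(s)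
--     for i, c in enumerate(s):
--         if c == '-' and i + 1 < n and s[i + 1] == '(':
--             out.append('-' if t % 2 == 0 else '+')
--             t += 1
--         elif c == ')':
--             t -= 1
--         elif c == '(':
--             pass
--         elif c == '+' or c == '-':
--             out.append(c if t % 2 == 0 else ('-' if c == '+' else '+'))
--         else:
--             out.append(c)
--     return ''.join(out)
-- ===== Notes on version B (the rewrite author's own statement) =====
-- stated objective: faster
-- what changed: B drops A's stack of '-(' markers and its inner flipSign loop (re-flipping the sign triggerCounter times per operator) and instead keeps one integer depth counter whose parity directly selects the emitted sign in a single pass.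
import Mathlib
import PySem

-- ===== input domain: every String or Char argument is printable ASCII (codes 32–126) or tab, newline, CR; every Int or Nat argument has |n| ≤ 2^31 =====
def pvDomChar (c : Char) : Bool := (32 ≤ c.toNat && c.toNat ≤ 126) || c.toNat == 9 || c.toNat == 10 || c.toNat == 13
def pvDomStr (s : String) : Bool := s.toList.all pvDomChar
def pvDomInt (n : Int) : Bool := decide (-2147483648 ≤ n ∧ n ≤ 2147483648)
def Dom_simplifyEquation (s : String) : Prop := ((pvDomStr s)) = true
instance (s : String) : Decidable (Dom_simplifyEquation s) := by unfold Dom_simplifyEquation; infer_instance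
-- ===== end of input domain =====

-- B replaces A's stack of "-(" markers and its inner flipSign loops by a single integer
-- depth counter whose parity gives the emitted sign directly (one pass, no inner loop).

-- ===== PORT A =====
-- flipSign: dict lookup; the `none` arm is Python's KeyError, unreachable since A only
-- ever calls flipSign with "+" or "-".
def flipSign (sign : String) : String :=
  match (PySem.Dict.ofList [("+", "-"), ("-", "+")]).get? sign with
  | some x => x
  | none => sign

-- the loop over i in range(len(s)); `rest.head? = some '('` is exactly Python's s[i+1] == '('
-- (on a trailing '-' Python raises IndexError — excluded by Pre_).
-- result is accumulated as List Char (Python str concatenation, char by char / sign by sign).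
def aLoop : List Char → Int → List String → List Char → List Char
  | [], _, _, result => result
  | c :: rest, triggerCounter, stack, result =>
    if c = '-' ∧ rest.head? = some '(' then
      let triggerCounter' := triggerCounter + 1
      let sign := (PySem.List.pyRange 0 (triggerCounter' - 1) 1).foldl
                    (fun sg _ => flipSign sg) (String.ofList [c])
      aLoop rest triggerCounter' ("-(" :: stack) (result ++ sign.toList)
    else
      -- `if s[i] == ')': if stack.pop() == '-(': triggerCounter -= 1`
      -- (pop from an empty stack is Python's IndexError — excluded by Pre_)
      let st : Int × List String :=
        if c = ')' then
          match stack with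
          | top :: stackRest =>
            (if top = "-(" then triggerCounter - 1 else triggerCounter, stackRest)
          | [] => (triggerCounter, stack)
        else (triggerCounter, stack)
      if c = '(' ∨ c = ')' then aLoop rest st.1 st.2 result
      else if c = '+' ∨ c = '-' then
        let sign := (PySem.List.pyRange 0 st.1 1).foldl
                      (fun sg _ => flipSign sg) (String.ofList [c])
        aLoop rest st.1 st.2 (result ++ sign.toList)
      else aLoop rest st.1 st.2 (result ++ [c])

def simplifyEquation (s : String) : String := String.ofList (aLoop s.toList 0 [] [])

-- ===== PORT B =====
-- the loop over enumerate(s); `rest.head? = some '('` is exactly Source B's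
-- `i + 1 < n and s[i+1] == '('`; out is the list of appended chars, joined at the end.
def bLoop : List Char → Int → List Char → List Char
  | [], _, out => out
  | c :: rest, t, out =>
    if c = '-' ∧ rest.head? = some '(' then
      bLoop rest (t + 1) (out ++ [if PySem.Int.mod t 2 = 0 then '-' else '+'])
    else if c = ')' then bLoop rest (t - 1) out
    else if c = '(' then bLoop rest t out
    else if c = '+' ∨ c = '-' then
      bLoop rest t (out ++ [if PySem.Int.mod t 2 = 0 then c else (if c = '+' then '-' else '+')])
    else bLoop rest t (out ++ [c])

def simplifyEquation_alt (s : String) : String := String.ofList (bLoop s.toList 0 [])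

-- ===== PRECONDITION & SPEC =====
-- number of adjacent "-(" pairs in a list of chars
def opensCount (l : List Char) : Nat :=
  (l.zip l.tail).countP (fun p => p.1 = '-' ∧ p.2 = '(')

-- closed-form run condition relative to a starting trigger count t
def preAux (l : List Char) (t : Nat) : Prop :=
  (∀ i, i < l.length → l[i]? = some ')' →
      (l.take i).count ')' < t + opensCount (l.take i)) ∧
  l.getLast? ≠ some '-'

-- Pre_ excludes exactly the inputs where A raises: a ')' with no unmatched "-(" before it
-- (stack.pop() from an empty list, IndexError) and a trailing '-' (s[i+1], IndexError).
def Pre_simplifyEquation (s : String) : Prop := preAux s.toList 0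

instance (s : String) : Decidable (Pre_simplifyEquation s) := by
  unfold Pre_simplifyEquation preAux; infer_instance

def pvWitness_simplifyEquation : String := "a-(b+c)-d"

def Spec_simplifyEquation (s : String) (out : String) : Prop := out = simplifyEquation_alt s
instance (s : String) (out : String) : Decidable (Spec_simplifyEquation s out) := by
  unfold Spec_simplifyEquation; infer_instance

-- ===== CLAIM (what is proved, stated in full; the proofs are below) =====
def Claim_equal_simplifyEquation : Prop := ∀ (s : String), Dom_simplifyEquation s → Pre_simplifyEquation s → Spec_simplifyEquation s (simplifyEquation s)

-- ===== LEMMAS AND PROOFS =====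

theorem opensCount_cons (c : Char) (rest : List Char) :
    opensCount (c :: rest)
      = (if c = '-' ∧ rest.head? = some '(' then 1 else 0) + opensCount rest := by
  cases rest <;> simp [opensCount, List.countP_cons] <;> split <;> simp_all <;> omega

theorem preAux_step_open {c : Char} {rest : List Char} {t : Nat}
    (hc : c = '-' ∧ rest.head? = some '(') (h : preAux (c :: rest) t) :
    preAux rest (t + 1) := by
  obtain ⟨hc, hh⟩ := hc
  obtain ⟨h1, h2⟩ := h
  constructor
  · intro i hi hgi
    have hi0 : i ≠ 0 := by
      rintro rfl
      rw [show rest[0]? = rest.head? from List.head?_eq_getElem?.symm, hh] at hgi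
      simp at hgi
    have := h1 (i + 1) (by simpa using Nat.succ_lt_succ hi) (by simpa using hgi)
    rw [List.take_succ_cons, List.count_cons, opensCount_cons] at this
    rw [List.head?_take, if_neg hi0, hh] at this
    simp [hc] at this
    omega
  · cases rest with
    | nil => simp at hh
    | cons d r => rw [List.getLast?_cons_cons] at h2; exact h2

theorem preAux_close_pos {rest : List Char} {t : Nat} (h : preAux (')' :: rest) t) :
    0 < t := by
  have := h.1 0 (by simp) (by simp)
  simpa [opensCount] using this

theorem preAux_step_close {rest : List Char} {t : Nat} (h : preAux (')' :: rest) t) :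
    preAux rest (t - 1) := by
  have ht := preAux_close_pos h
  obtain ⟨h1, h2⟩ := h
  constructor
  · intro i hi hgi
    have := h1 (i + 1) (by simpa using Nat.succ_lt_succ hi) (by simpa using hgi)
    rw [List.take_succ_cons, List.count_cons, opensCount_cons] at this
    simp at this
    omega
  · cases rest with
    | nil => simp
    | cons d r => rw [List.getLast?_cons_cons] at h2; exact h2

theorem preAux_step_other {c : Char} {rest : List Char} {t : Nat}
    (hc : ¬(c = '-' ∧ rest.head? = some '(')) (hc2 : c ≠ ')')
    (h : preAux (c :: rest) t) : preAux rest t := by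
  obtain ⟨h1, h2⟩ := h
  constructor
  · intro i hi hgi
    have := h1 (i + 1) (by simpa using Nat.succ_lt_succ hi) (by simpa using hgi)
    rw [List.take_succ_cons, List.count_cons, opensCount_cons] at this
    have hpair : ¬(c = '-' ∧ (List.take i rest).head? = some '(') := by
      rw [List.head?_take]
      rcases Nat.eq_zero_or_pos i with h0 | h0
      · simp [h0]
      · rw [if_neg (Nat.pos_iff_ne_zero.mp h0)]; exact hc
    rw [if_neg hpair] at this
    simp [hc2] at this
    omega
  · cases rest with
    | nil => simp
    | cons d r => rw [List.getLast?_cons_cons] at h2; exact h2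

theorem flipSign_flip (t : Nat) (s0 : String) (h : flipSign (flipSign s0) = s0) :
    (PySem.List.pyRange 0 (t : Int) 1).foldl (fun sg _ => flipSign sg) s0
      = (if t % 2 = 0 then s0 else flipSign s0) := by
  induction t with
  | zero => simp [PySem.List.pyRange_one_eq_nil]
  | succ t ih =>
    have hc : ((t + 1 : Nat) : Int) = (t : Int) + 1 := by push_cast; ring
    rw [hc, PySem.List.pyRange_one_succ_right (by positivity), List.foldl_append, ih]
    by_cases hp : t % 2 = 0
    · have h1 : (t + 1) % 2 = 1 := by omega
      simp [hp, h1]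
    · have h1 : (t + 1) % 2 = 0 := by omega
      simp [hp, h1, List.foldl, h]

theorem loops_eq (l : List Char) : ∀ (t : Nat) (acc : List Char), preAux l t →
    aLoop l (t : Int) (List.replicate t "-(") acc = bLoop l (t : Int) acc := by
  induction l with
  | nil => intro t acc _; rfl
  | cons c rest ih =>
    intro t acc h
    have hcast : ((t : Int) + 1) = ((t + 1 : Nat) : Int) := by push_cast; ring
    by_cases hmo : c = '-' ∧ rest.head? = some '('
    · obtain ⟨hc, hh⟩ := hmo; subst hc
      have hstep := preAux_step_open ⟨rfl, hh⟩ h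
      simp [aLoop, bLoop, hh]
      rw [flipSign_flip t "-" (by decide)]
      by_cases hp : t % 2 = 0
      · rw [if_pos hp, if_pos (show (2:Int) ∣ (t:Int) by omega)]
        rw [hcast, ← List.replicate_succ]
        simpa using ih (t + 1) (acc ++ ['-']) hstep
      · rw [if_neg hp, show flipSign "-" = "+" from rfl,
            if_neg (show ¬(2:Int) ∣ (t:Int) by omega)]
        rw [hcast, ← List.replicate_succ]
        simpa using ih (t + 1) (acc ++ ['+']) hstep
    · by_cases hcl : c = ')'
      · subst hcl
        have ht := preAux_close_pos h
        obtain ⟨t', rfl⟩ : ∃ t', t = t' + 1 := ⟨t - 1, by omega⟩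
        have hstep := preAux_step_close h
        simp [aLoop, bLoop, List.replicate_succ]
        simpa using ih t' acc (by simpa using hstep)
      · by_cases hop : c = '('
        · subst hop
          simp [aLoop, bLoop]
          exact ih t acc (preAux_step_other hmo hcl h)
        · have hstep := preAux_step_other hmo hcl h
          by_cases hpm : c = '+'
          · subst hpm
            simp [aLoop, bLoop]
            rw [flipSign_flip t "+" (by decide)]
            by_cases hp : t % 2 = 0
            · rw [if_pos hp, if_pos (show (2:Int) ∣ (t:Int) by omega)]
              simpa using ih t (acc ++ ['+']) hstep
            · rw [if_neg hp, show flipSign "+" = "-" from rfl,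
                  if_neg (show ¬(2:Int) ∣ (t:Int) by omega)]
              simpa using ih t (acc ++ ['-']) hstep
          · by_cases hmn : c = '-'
            · subst hmn
              have hh' : ¬rest.head? = some '(' := fun hx => hmo ⟨rfl, hx⟩
              simp [aLoop, bLoop, hh']
              rw [flipSign_flip t "-" (by decide)]
              by_cases hp : t % 2 = 0
              · rw [if_pos hp, if_pos (show (2:Int) ∣ (t:Int) by omega)]
                simpa using ih t (acc ++ ['-']) hstep
              · rw [if_neg hp, show flipSign "-" = "+" from rfl,
                    if_neg (show ¬(2:Int) ∣ (t:Int) by omega)]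
                simpa using ih t (acc ++ ['+']) hstep
            · simp [aLoop, bLoop, hmn, hcl, hop, hpm]
              exact ih t (acc ++ [c]) hstep

-- ===== VERDICT (by name: the statement is the Claim_ definition above) =====
theorem simplifyEquation_spec : Claim_equal_simplifyEquation := by
  intro s _ hpre
  unfold Spec_simplifyEquation simplifyEquation simplifyEquation_alt
  exact congrArg String.ofList (loops_eq s.toList 0 [] hpre)
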